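-- pv_equiv track=rewrite | github.com/lowrylab-cuboulder/pan-genome | standardDeviation_2016v3.py | makeGeneSets
-- ===== SOURCE A (Python) =====
-- def makeGeneSets(dict, intersection):
-- 	gSetKeys = {}
-- 	for genome in dict:
-- 		gSetKeys[genome] = set([])
-- 		for keys in intersection:
-- 			if dict[genome] in keys:
-- 				gSetKeys[genome].add(keys)
-- 	return gSetKeys
-- ===== SOURCE B (Python) =====
-- def makeGeneSets(dict, intersection):
--     # Build a reverse index element -> set of key-tuples containing it, then one lookup per genome.
--     index = {}
--     for keys in intersection:
--         for e in keys:
--             index.setdefault(e, set()).add(keys)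
--     return {genome: index.get(value, set()) for genome, value in dict.items()}
-- ===== Notes on version B (the rewrite author's own statement) =====
-- stated objective: faster
-- what changed: Replaced the per-genome scan over all intersection tuples with a reverse index element->set-of-tuples built once, so each genome needs a single hash lookup.
import Mathlib
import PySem

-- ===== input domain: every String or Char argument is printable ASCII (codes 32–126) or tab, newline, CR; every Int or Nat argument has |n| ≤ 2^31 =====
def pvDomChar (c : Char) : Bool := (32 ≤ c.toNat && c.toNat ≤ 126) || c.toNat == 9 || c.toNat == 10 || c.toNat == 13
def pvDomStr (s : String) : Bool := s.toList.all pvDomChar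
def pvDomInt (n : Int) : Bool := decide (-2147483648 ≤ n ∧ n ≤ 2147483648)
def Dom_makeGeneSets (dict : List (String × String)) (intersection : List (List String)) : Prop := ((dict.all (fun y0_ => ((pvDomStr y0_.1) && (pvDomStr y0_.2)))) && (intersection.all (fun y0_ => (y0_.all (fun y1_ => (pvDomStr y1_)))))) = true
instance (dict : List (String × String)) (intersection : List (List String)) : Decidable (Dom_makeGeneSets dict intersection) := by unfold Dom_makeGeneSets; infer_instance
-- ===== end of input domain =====

-- B replaces A's per-genome scan over all intersection tuples with a reverse index
-- element -> set of tuples, built once; one lookup per genome (objective: faster).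

-- ===== PORT A =====
-- A: for each genome in the dict, scan every keys-tuple of intersection and collect
-- those containing dict[genome] into a set.
def makeGeneSets (dict : List (String × String)) (intersection : List (List String)) : List (String × List (List String)) :=
  let d := PySem.Dict.ofList dict      -- the Python dict argument (assoc list, last value wins)
  let gSetKeys : PySem.Dict String (PySem.Set (List String)) :=
    d.items.foldl (fun gs kv =>
      PySem.Dict.insert gs kv.1
        (intersection.foldl (fun s keys =>
          if keys.contains kv.2 then PySem.Set.add s keys else s) PySem.Set.empty))
      PySem.Dict.empty
  gSetKeys.items

-- ===== PORT B =====
-- B: build index : element -> set of keys-tuples containing it, then one lookup per genome.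
def makeGeneSets_alt (dict : List (String × String)) (intersection : List (List String)) : List (String × List (List String)) :=
  let index : PySem.Dict String (PySem.Set (List String)) :=
    intersection.foldl (fun idx keys =>
      keys.foldl (fun idx e =>
        PySem.Dict.insert idx e (PySem.Set.add (PySem.Dict.getD idx e PySem.Set.empty) keys)) idx)
      PySem.Dict.empty
  let d := PySem.Dict.ofList dict
  (d.items.foldl (fun gs kv =>
    PySem.Dict.insert gs kv.1 (PySem.Dict.getD index kv.2 PySem.Set.empty))
    PySem.Dict.empty).items

-- ===== PRECONDITION & SPEC =====
def Spec_makeGeneSets (dict : List (String × String)) (intersection : List (List String)) (out : List (String × List (List String))) : Prop := out = makeGeneSets_alt dict intersection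
instance (dict : List (String × String)) (intersection : List (List String)) (out : List (String × List (List String))) : Decidable (Spec_makeGeneSets dict intersection out) := by unfold Spec_makeGeneSets; infer_instance

-- ===== CLAIM (what is proved, stated in full; the proofs are below) =====
def Claim_equal_makeGeneSets : Prop := ∀ (dict : List (String × String)) (intersection : List (List String)), Dom_makeGeneSets dict intersection → Spec_makeGeneSets dict intersection (makeGeneSets dict intersection)

-- ===== LEMMAS AND PROOFS =====

-- inner loop of B's index build: effect on the entry for v
theorem getD_inner (keys : List String) (es : List String)
    (idx : PySem.Dict String (PySem.Set (List String))) (v : String) :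
    PySem.Dict.getD
      (es.foldl (fun idx e =>
        PySem.Dict.insert idx e (PySem.Set.add (PySem.Dict.getD idx e PySem.Set.empty) keys)) idx)
      v PySem.Set.empty
    = if es.contains v then PySem.Set.add (PySem.Dict.getD idx v PySem.Set.empty) keys
      else PySem.Dict.getD idx v PySem.Set.empty := by
  induction es generalizing idx with
  | nil => simp
  | cons e es ih =>
    simp only [List.foldl_cons, ih, List.contains_cons]
    by_cases hev : v = e
    · subst hev
      simp
    · simp [PySem.Dict.getD_insert, hev]

-- the full index: looking up v gives exactly A's inner scan over intersection
theorem getD_index (inter : List (List String))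
    (idx : PySem.Dict String (PySem.Set (List String))) (v : String) :
    PySem.Dict.getD
      (inter.foldl (fun idx keys =>
        keys.foldl (fun idx e =>
          PySem.Dict.insert idx e (PySem.Set.add (PySem.Dict.getD idx e PySem.Set.empty) keys)) idx)
        idx)
      v PySem.Set.empty
    = inter.foldl (fun s keys => if keys.contains v then PySem.Set.add s keys else s)
        (PySem.Dict.getD idx v PySem.Set.empty) := by
  induction inter generalizing idx with
  | nil => rfl
  | cons keys inter ih =>
    simp only [List.foldl_cons, ih, getD_inner]

-- ===== VERDICT (by name: the statement is the Claim_ definition above) =====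
theorem makeGeneSets_spec : Claim_equal_makeGeneSets := by
  intro dict intersection _
  unfold Spec_makeGeneSets makeGeneSets makeGeneSets_alt
  simp only []
  congr 1
  apply PySem.List.foldl_congr_mem
  intro acc kv _
  congr 1
  rw [getD_index]
  simp
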